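-- pv_equiv track=rewrite | github.com/OpenBlatam/AI-Models-Clone | markdown_to_professional_docs_ai/services/converters/rtf_converter.py | _escape_rtf
-- ===== SOURCE A (Python) =====
-- def _escape_rtf(text: str) -> str:
--     """Escape special RTF characters"""
--     replacements = {
--         '\\': '\\\\',
--         '{': '\\{',
--         '}': '\\}',
--         '\n': '\\par\n',
--     }
--
--     for char, replacement in replacements.items():
--         text = text.replace(char, replacement)
--
--     return text
-- ===== SOURCE B (Python) =====
-- def _escape_rtf(text: str) -> str:
--     """Escape special RTF characters (single left-to-right character scan)."""
--     mapping = {'\\': '\\\\', '{': '\\{', '}': '\\}', '\n': '\\par\n'}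
--     return ''.join(mapping.get(c, c) for c in text)
-- ===== Notes on version B (the rewrite author's own statement) =====
-- stated objective: alternative
-- what changed: Replaces A's four sequential full-string str.replace passes (one per escape rule) with a single left-to-right scan over the characters, mapping each original character through a dict and joining the pieces.
import Mathlib
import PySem

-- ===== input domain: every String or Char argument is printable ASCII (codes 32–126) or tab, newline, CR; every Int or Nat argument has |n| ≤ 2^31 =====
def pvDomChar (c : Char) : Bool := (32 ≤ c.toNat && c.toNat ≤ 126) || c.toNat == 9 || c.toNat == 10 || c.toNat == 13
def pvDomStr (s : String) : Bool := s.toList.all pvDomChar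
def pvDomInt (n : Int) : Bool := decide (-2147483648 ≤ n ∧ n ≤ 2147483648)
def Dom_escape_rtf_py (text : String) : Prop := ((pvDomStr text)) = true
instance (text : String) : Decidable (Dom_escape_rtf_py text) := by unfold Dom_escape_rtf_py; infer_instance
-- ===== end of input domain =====

-- B replaces A's four sequential full-string replace passes by one character scan with a dict lookup (objective: alternative single-pass decomposition).


-- ===== PORT A =====
-- A: a dict of (char, replacement) rules, applied as successive full-string replace passes.
def escape_rtf_py (text : String) : String :=
  let replacements : PySem.Dict String String :=
    PySem.Dict.ofList [("\\", "\\\\"), ("{", "\\{"), ("}", "\\}"), ("\n", "\\par\n")]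
  replacements.items.foldl (fun t p => PySem.Str.replace t p.1 p.2) text

-- ===== PORT B =====
-- B: one scan over the characters, each looked up in the mapping ('c' itself when absent), joined by ''.
def escape_rtf_py_alt (text : String) : String :=
  let mapping : PySem.Dict Char String :=
    PySem.Dict.ofList [('\\', "\\\\"), ('{', "\\{"), ('}', "\\}"), ('\n', "\\par\n")]
  PySem.Str.join "" (text.toList.map (fun c => mapping.getD c (String.ofList [c])))

-- ===== PRECONDITION & SPEC =====
def Spec_escape_rtf_py (text : String) (out : String) : Prop := out = escape_rtf_py_alt text
instance (text : String) (out : String) : Decidable (Spec_escape_rtf_py text out) := by unfold Spec_escape_rtf_py; infer_instance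

-- ===== CLAIM (what is proved, stated in full; the proofs are below) =====
def Claim_equal_escape_rtf_py : Prop := ∀ (text : String), Dom_escape_rtf_py text → Spec_escape_rtf_py text (escape_rtf_py text)

-- ===== LEMMAS AND PROOFS =====

-- replace with a single-char pattern is a per-character flatMap
theorem replace_go_singleton (c : Char) (new : List Char) :
    ∀ (l acc : List Char) (fuel : Nat), l.length ≤ fuel →
      PySem.Chars.replace.go [c] new fuel l acc
        = acc.reverse ++ l.flatMap (fun x => if x = c then new else [x]) := by
  intro l
  induction l with
  | nil =>
      intro acc fuel _
      cases fuel <;> simp [PySem.Chars.replace.go]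
  | cons x t ih =>
      intro acc fuel hf
      cases fuel with
      | zero => simp at hf
      | succ fuel =>
        simp only [List.length_cons, Nat.succ_le_succ_iff] at hf
        by_cases hx : x = c
        · subst hx
          simp [PySem.Chars.replace.go, List.isPrefixOf, ih _ _ hf]
        · simp [PySem.Chars.replace.go, List.isPrefixOf, hx, ih _ _ hf]
          exact fun h => absurd h.symm hx

theorem replace_singleton (s : List Char) (c : Char) (new : List Char) :
    PySem.Chars.replace s [c] new = s.flatMap (fun x => if x = c then new else [x]) := by
  unfold PySem.Chars.replace
  simp [replace_go_singleton c new s [] s.length (Nat.le_refl _)]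

-- the per-character effect of B's mapping lookup
def escChar (c : Char) : List Char :=
  if c = '\\' then ['\\', '\\']
  else if c = '{' then ['\\', '{']
  else if c = '}' then ['\\', '}']
  else if c = '\n' then ['\\', 'p', 'a', 'r', '\n']
  else [c]

-- composing A's four per-character substitutions gives escChar
theorem chain_eq_escChar (c : Char) :
    List.flatMap (fun y =>
      List.flatMap (fun z =>
        List.flatMap (fun x => if x = '\n' then ['\\', 'p', 'a', 'r', '\n'] else [x])
          (if z = '}' then ['\\', '}'] else [z]))
        (if y = '{' then ['\\', '{'] else [y]))
      (if c = '\\' then ['\\', '\\'] else [c]) = escChar c := by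
  by_cases h1 : c = '\\'
  · subst h1; simp [escChar]
  · by_cases h2 : c = '{'
    · subst h2; simp [escChar]
    · by_cases h3 : c = '}'
      · subst h3; simp [escChar]
      · by_cases h4 : c = '\n'
        · subst h4; simp [escChar]
        · simp [escChar, h1, h2, h3, h4]

theorem getD_eq_escChar (c : Char) :
    (PySem.Dict.getD
        (PySem.Dict.ofList [('\\', "\\\\"), ('{', "\\{"), ('}', "\\}"), ('\n', "\\par\n")])
        c (String.ofList [c])).toList = escChar c := by
  by_cases h1 : c = '\\'
  · subst h1; decide
  · by_cases h2 : c = '{'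
    · subst h2; decide
    · by_cases h3 : c = '}'
      · subst h3; decide
      · by_cases h4 : c = '\n'
        · subst h4; decide
        · simp [PySem.Dict.getD, PySem.Dict.ofList, PySem.Dict.get?, PySem.Dict.update,
                PySem.Dict.empty, PySem.Dict.insert, PySem.Dict.contains, beq_iff_eq, escChar, h1, h2, h3, h4,
                Ne.symm h1, Ne.symm h2, Ne.symm h3, Ne.symm h4]

-- join with the empty separator is flatten
theorem join_nil_eq_flatten : ∀ (l : List (List Char)), PySem.Chars.join [] l = l.flatten := by
  intro l
  induction l with
  | nil => simp [PySem.Chars.join_nil]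
  | cons a t ih =>
    cases t with
    | nil => simp [PySem.Chars.join_singleton]
    | cons b t' => simp [PySem.Chars.join_cons_cons, ih]

-- ===== VERDICT (by name: the statement is the Claim_ definition above) =====
theorem escape_rtf_py_spec : Claim_equal_escape_rtf_py := by
  intro text _
  unfold Spec_escape_rtf_py escape_rtf_py escape_rtf_py_alt
  apply String.toList_inj.mp
  dsimp only
  rw [show (PySem.Dict.ofList
        [("\\", "\\\\"), ("{", "\\{"), ("}", "\\}"), ("\n", "\\par\n")]).items
      = [("\\", "\\\\"), ("{", "\\{"), ("}", "\\}"), ("\n", "\\par\n")] from by decide]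
  simp only [List.foldl, PySem.Str.replace, PySem.Str.join, String.toList_ofList, List.map_map,
    show ("\\" : String).toList = ['\\'] from by simp,
    show ("{" : String).toList = ['{'] from by simp,
    show ("}" : String).toList = ['}'] from by simp,
    show ("\n" : String).toList = ['\n'] from by simp,
    show ("\\\\" : String).toList = ['\\', '\\'] from by simp,
    show ("\\{" : String).toList = ['\\', '{'] from by simp,
    show ("\\}" : String).toList = ['\\', '}'] from by simp,
    show ("\\par\n" : String).toList = ['\\', 'p', 'a', 'r', '\n'] from by simp,
    show ("" : String).toList = [] from by simp]
  rw [replace_singleton, replace_singleton, replace_singleton, replace_singleton,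
      join_nil_eq_flatten]
  simp only [List.flatMap_assoc, Function.comp_def, getD_eq_escChar,
    chain_eq_escChar, ← List.flatMap_def]
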